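-- pv_equiv track=rewrite | github.com/HarshitaKoshta/PYTHON | SHEET/Sheet5/F.Equation.py | equation_sum
-- ===== SOURCE A (Python) =====
-- def power(x, n):
--     result = 1
--     for i in range(n):
--         result *= x
--     return result
--
-- def equation_sum(x, n):
--     s = 0
--     for i in range(0,n+1,2):
--         if i == 0:
--             s += power(x,0)-1
--         else:
--             s += power(x,i)
--     return s
-- ===== SOURCE B (Python) =====
-- def equation_sum(x, n):
--     s = 0
--     p = x * x
--     for _ in range(2, n + 1, 2):
--         s += p
--         p *= x * x
--     return s
-- ===== Notes on version B (the rewrite author's own statement) =====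
-- stated objective: faster
-- what changed: Replaces the per-term power() recomputation (a fresh O(i) multiplication loop for each even i) with a single pass that maintains the running power x^i incrementally, multiplying by x*x each step; the always-zero i==0 term (x^0-1) is dropped.
import Mathlib
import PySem

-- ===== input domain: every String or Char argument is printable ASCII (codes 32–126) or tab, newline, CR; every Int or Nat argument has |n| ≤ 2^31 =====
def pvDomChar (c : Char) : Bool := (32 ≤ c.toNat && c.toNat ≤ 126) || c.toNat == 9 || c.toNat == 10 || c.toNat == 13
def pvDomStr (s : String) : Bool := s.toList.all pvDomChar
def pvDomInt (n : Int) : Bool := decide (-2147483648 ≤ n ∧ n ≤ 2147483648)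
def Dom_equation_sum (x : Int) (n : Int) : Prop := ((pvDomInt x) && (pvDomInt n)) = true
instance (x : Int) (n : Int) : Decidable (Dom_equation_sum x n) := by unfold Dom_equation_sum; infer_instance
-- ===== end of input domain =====

-- B replaces A's per-term power() recomputation with one pass maintaining the running power x^i (multiply by x*x each step): O(n) instead of O(n^2).


-- ===== PORT A =====
-- power(x, n): result = 1; for i in range(n): result *= x
def pvPower (x : Int) (n : Int) : Int :=
  (PySem.List.pyRange 0 n 1).foldl (fun result _ => result * x) 1

-- s = 0; for i in range(0, n+1, 2): if i == 0: s += power(x,0)-1 else: s += power(x,i)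
def equation_sum (x : Int) (n : Int) : Int :=
  (PySem.List.pyRange 0 (n + 1) 2).foldl
    (fun s i => if i = 0 then s + (pvPower x 0 - 1) else s + pvPower x i) 0

-- ===== PORT B =====
-- s = 0; p = x*x; for _ in range(2, n+1, 2): s += p; p *= x*x
def equation_sum_alt (x : Int) (n : Int) : Int :=
  ((PySem.List.pyRange 2 (n + 1) 2).foldl
    (fun (sp : Int × Int) _ => (sp.1 + sp.2, sp.2 * (x * x))) (0, x * x)).1

-- ===== PRECONDITION & SPEC =====
def Spec_equation_sum (x : Int) (n : Int) (out : Int) : Prop := out = equation_sum_alt x n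
instance (x : Int) (n : Int) (out : Int) : Decidable (Spec_equation_sum x n out) := by unfold Spec_equation_sum; infer_instance

-- ===== CLAIM (what is proved, stated in full; the proofs are below) =====
def Claim_equal_equation_sum : Prop := ∀ (x : Int) (n : Int), Dom_equation_sum x n → Spec_equation_sum x n (equation_sum x n)

-- ===== LEMMAS AND PROOFS =====

-- multiply-by-x fold is a power of x
lemma foldl_mul_const (x : Int) (l : List Int) (r : Int) :
    l.foldl (fun result _ => result * x) r = r * x ^ l.length := by
  induction l generalizing r with
  | nil => simp
  | cons a t ih => simp [List.foldl_cons, ih, pow_succ]; ring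

lemma pvPower_eq (x n : Int) : pvPower x n = x ^ n.toNat := by
  unfold pvPower
  rw [PySem.List.pyRange_of_pos 0 n (by norm_num), foldl_mul_const]
  simp only [List.length_map, List.length_range]
  rw [show (if (0:Int) < n then ((n - 0 + 1 - 1) / 1).toNat else 0) = n.toNat from by
    split_ifs <;> omega]
  rw [one_mul]

-- an add-only fold over range is a Finset sum
lemma foldl_range_add (f : ℕ → Int) (m : ℕ) :
    (List.range m).foldl (fun s k => s + f k) 0 = ∑ k ∈ Finset.range m, f k := by
  induction m with
  | zero => simp
  | succ m ih => rw [List.range_succ, List.foldl_append, Finset.sum_range_succ, ih]; simp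

-- A's loop computes the sum of (x*x)^k, with the k = 0 term equal to 0
lemma A_eq (x n : Int) :
    equation_sum x n =
      ∑ k ∈ Finset.range (if 0 < n + 1 then ((n + 1 - 0 + 2 - 1) / 2).toNat else 0),
        (if k = 0 then 0 else (x * x) ^ k) := by
  unfold equation_sum
  rw [PySem.List.pyRange_of_pos 0 (n + 1) (by norm_num), List.foldl_map]
  have hfun : (fun (s : Int) (k : ℕ) =>
      if (0 + 2 * (k : Int)) = 0 then s + (pvPower x 0 - 1) else s + pvPower x (0 + 2 * (k : Int)))
      = fun (s : Int) (k : ℕ) => s + (if k = 0 then 0 else (x * x) ^ k) := by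
    funext s k
    rcases Nat.eq_zero_or_pos k with hk | hk
    · subst hk; simp [pvPower_eq]
    · have hne : (0 + 2 * (k : Int)) ≠ 0 := by omega
      rw [if_neg hne, if_neg (by omega)]
      have ht : (0 + 2 * (k : Int)).toNat = 2 * k := by omega
      rw [pvPower_eq, ht, pow_mul, sq]
  rw [hfun, foldl_range_add]

-- B's loop invariant: first component = s + geometric sum starting at p
lemma B_pair (x : Int) (l : List Int) :
    ∀ (s p : Int),
      (l.foldl (fun (sp : Int × Int) _ => (sp.1 + sp.2, sp.2 * (x * x))) (s, p)).1
        = s + ∑ k ∈ Finset.range l.length, p * (x * x) ^ k := by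
  induction l with
  | nil => intro s p; simp
  | cons a t ih =>
      intro s p
      rw [List.foldl_cons, ih, List.length_cons, Finset.sum_range_succ']
      have : ∀ k ∈ Finset.range t.length,
          p * (x * x) * (x * x) ^ k = p * (x * x) ^ (k + 1) := by
        intro k _; ring
      rw [Finset.sum_congr rfl this]
      ring

lemma B_eq (x n : Int) :
    equation_sum_alt x n =
      ∑ k ∈ Finset.range (if 2 < n + 1 then ((n + 1 - 2 + 2 - 1) / 2).toNat else 0),
        (x * x) * (x * x) ^ k := by
  unfold equation_sum_alt
  rw [PySem.List.pyRange_of_pos 2 (n + 1) (by norm_num), B_pair]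
  simp

lemma eq_main (x n : Int) : equation_sum x n = equation_sum_alt x n := by
  rw [A_eq, B_eq]
  rcases lt_trichotomy n 0 with hn | hn | hn
  · rw [if_neg (by omega), if_neg (by omega)]; simp
  · subst hn
    norm_num
  · rcases lt_or_ge n 2 with h2 | h2
    · have hn1 : n = 1 := by omega
      subst hn1
      norm_num
    · have hA : (if (0:Int) < n + 1 then ((n + 1 - 0 + 2 - 1) / 2).toNat else 0)
          = ((n + 1 - 2 + 2 - 1) / 2).toNat + 1 := by
        rw [if_pos (by omega)]; omega
      have hB : (if (2:Int) < n + 1 then ((n + 1 - 2 + 2 - 1) / 2).toNat else 0)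
          = ((n + 1 - 2 + 2 - 1) / 2).toNat := by
        rw [if_pos (by omega)]
      rw [hA, hB, Finset.sum_range_succ']
      have hterm : ∀ k ∈ Finset.range ((n + 1 - 2 + 2 - 1) / 2).toNat,
          (if k + 1 = 0 then (0 : Int) else (x * x) ^ (k + 1)) = x * x * (x * x) ^ k := by
        intro k _
        rw [if_neg (Nat.succ_ne_zero k)]
        ring
      rw [Finset.sum_congr rfl hterm]
      norm_num

-- ===== VERDICT (by name: the statement is the Claim_ definition above) =====
theorem equation_sum_spec : Claim_equal_equation_sum := by
  intro x n _
  unfold Spec_equation_sum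
  exact eq_main x n
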